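-- pv_equiv track=rewrite | github.com/keyboardAnt/newt | tdmpc2/discover/wandb_connector.py | _extract_task_from_tags
-- ===== SOURCE A (Python) =====
-- from typing import TYPE_CHECKING, Iterable, Iterator, List, Optional
--
-- def _extract_task_from_tags(tags: List[str]) -> Optional[str]:
--     """Extract task name from wandb tags (e.g., ['expert-foo', 'foo', 'seed:1'] -> 'foo')."""
--     for tag in tags:
--         if tag.startswith("seed:") or tag.startswith("expert-") or tag.startswith("eval-"):
--             continue
--         return tag
--     # Fallback: try to extract from expert- tag
--     for tag in tags:
--         if tag.startswith("expert-"):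
--             return tag[7:]  # Remove "expert-" prefix
--     return None
-- ===== SOURCE B (Python) =====
-- def _extract_task_from_tags(tags):
--     """Extract task name from wandb tags, single pass with a fallback accumulator."""
--     fallback = None
--     for tag in tags:
--         if not (tag.startswith("seed:") or tag.startswith("expert-") or tag.startswith("eval-")):
--             return tag
--         if tag.startswith("expert-") and fallback is None:
--             fallback = tag[7:]
--     return fallback
-- ===== Notes on version B (the rewrite author's own statement) =====
-- stated objective: alternative
-- what changed: Fuses A's two separate scans (first non-prefixed tag, then first expert- suffix) into one pass that maintains a fallback accumulator.
import Mathlib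
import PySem

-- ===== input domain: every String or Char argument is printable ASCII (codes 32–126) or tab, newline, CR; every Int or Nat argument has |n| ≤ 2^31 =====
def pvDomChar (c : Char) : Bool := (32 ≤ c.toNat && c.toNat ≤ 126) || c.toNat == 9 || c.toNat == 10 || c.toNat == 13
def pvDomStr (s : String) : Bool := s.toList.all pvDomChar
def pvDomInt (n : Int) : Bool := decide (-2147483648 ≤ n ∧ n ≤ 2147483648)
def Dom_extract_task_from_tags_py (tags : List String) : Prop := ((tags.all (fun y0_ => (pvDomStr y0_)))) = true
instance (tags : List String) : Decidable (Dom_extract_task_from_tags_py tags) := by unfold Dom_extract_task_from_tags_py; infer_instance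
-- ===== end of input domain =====

-- B fuses A's two scans into a single pass with a fallback accumulator (alternative decomposition, same cost).


-- ===== PORT A =====
def pyALoop1 : List String → Option String
  | [] => none
  | t :: rest =>
    if PySem.Str.startswith t "seed:" || PySem.Str.startswith t "expert-" || PySem.Str.startswith t "eval-" then
      pyALoop1 rest
    else some t

def pyALoop2 : List String → Option String
  | [] => none
  | t :: rest =>
    if PySem.Str.startswith t "expert-" then some (PySem.Str.slice t (some 7) none)
    else pyALoop2 rest

def extract_task_from_tags_py (tags : List String) : Option String :=
  match pyALoop1 tags with
  | some t => some t
  | none => pyALoop2 tags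

-- ===== PORT B =====
-- B: one pass over tags maintaining a fallback accumulator
def pyBLoop : List String → Option String → Option String
  | [], fallback => fallback
  | t :: rest, fallback =>
    if !(PySem.Str.startswith t "seed:" || PySem.Str.startswith t "expert-" || PySem.Str.startswith t "eval-") then
      some t
    else if PySem.Str.startswith t "expert-" && fallback.isNone then
      pyBLoop rest (some (PySem.Str.slice t (some 7) none))
    else
      pyBLoop rest fallback

def extract_task_from_tags_py_alt (tags : List String) : Option String :=
  pyBLoop tags none

-- ===== PRECONDITION & SPEC =====
def Spec_extract_task_from_tags_py (tags : List String) (out : Option String) : Prop := out = extract_task_from_tags_py_alt tags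
instance (tags : List String) (out : Option String) : Decidable (Spec_extract_task_from_tags_py tags out) := by unfold Spec_extract_task_from_tags_py; infer_instance

-- ===== CLAIM (what is proved, stated in full; the proofs are below) =====
def Claim_equal_extract_task_from_tags_py : Prop := ∀ (tags : List String), Dom_extract_task_from_tags_py tags → Spec_extract_task_from_tags_py tags (extract_task_from_tags_py tags)

-- ===== LEMMAS AND PROOFS =====
lemma pyBLoop_char (tags : List String) : ∀ fb : Option String,
    pyBLoop tags fb =
      match pyALoop1 tags with
      | some t => some t
      | none => match fb with | some f => some f | none => pyALoop2 tags := by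
  induction tags with
  | nil => intro fb; cases fb <;> rfl
  | cons t rest ih =>
    intro fb
    cases hs : PySem.Str.startswith t "seed:" <;>
      cases he : PySem.Str.startswith t "expert-" <;>
        cases hv : PySem.Str.startswith t "eval-" <;>
          cases fb <;>
            simp_all [pyBLoop, pyALoop1, pyALoop2, ih]

-- ===== VERDICT (by name: the statement is the Claim_ definition above) =====
theorem extract_task_from_tags_py_spec : Claim_equal_extract_task_from_tags_py := by
  intro tags _
  unfold Spec_extract_task_from_tags_py extract_task_from_tags_py extract_task_from_tags_py_alt
  rw [pyBLoop_char]
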